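-- pv_equiv track=rewrite | github.com/DevGilded/caesarCipher | main.py | opplok_cipher
-- ===== SOURCE A (Python) =====
-- def caesar_cipher(msg: str, shift: int) -> str:
--     result = ''
--
--     for char in msg:
--         if char.isalpha():
--             start = ord('A') if char.isupper() else ord('a')
--             offset = (ord(char) - start + shift) % 26
--             result += chr(start + offset)
--         else:
--             result += char
--
--     return result
--
-- def opplok_cipher(msg: str, shift: int) -> str:
--     result = ''
--
--     for char in msg:
--         if char.isalpha():
--             result += caesar_cipher(char, ord(char) + shift)
--         else:
--             result += char
--
--     return result
-- ===== SOURCE B (Python) =====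
-- def opplok_cipher(msg: str, shift: int) -> str:
--     table = {}
--     for base in (65, 97):        # ord('A'), ord('a')
--         for o in range(base, base + 26):
--             table[o] = chr(base + (2 * o - base + shift) % 26)
--     return msg.translate(table)
-- ===== Notes on version B (the rewrite author's own statement) =====
-- stated objective: faster
-- what changed: Replaces the per-character Python loop with its nested caesar_cipher helper by a 52-entry translation table built once (ord -> chr(base + (2*ord - base + shift) % 26)) and a single str.translate pass.
import Mathlib
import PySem

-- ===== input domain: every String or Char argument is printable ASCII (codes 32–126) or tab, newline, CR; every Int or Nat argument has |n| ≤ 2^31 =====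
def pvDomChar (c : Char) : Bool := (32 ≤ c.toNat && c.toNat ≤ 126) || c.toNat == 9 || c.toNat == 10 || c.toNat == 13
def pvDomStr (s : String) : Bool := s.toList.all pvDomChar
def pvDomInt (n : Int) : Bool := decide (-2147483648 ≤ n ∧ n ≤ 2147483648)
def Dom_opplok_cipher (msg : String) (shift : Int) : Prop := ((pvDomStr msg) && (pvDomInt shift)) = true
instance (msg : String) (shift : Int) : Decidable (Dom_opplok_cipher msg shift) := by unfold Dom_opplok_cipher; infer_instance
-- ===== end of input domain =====

-- B replaces A's per-character loop (with its nested caesar_cipher helper) by a translation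
-- table built once and one str.translate pass; same results, measured faster (constant factor).

-- ===== PORT A =====
-- helper caesar_cipher from Source A, transliterated
def pvCaesarCipher (msg : String) (shift : Int) : String :=
  String.ofList (msg.toList.foldl (fun result char =>
    if PySem.Chars.isalpha char then
      let start : Int := if PySem.Chars.isupper char then 65 else 97
      let offset : Int := PySem.Int.mod ((char.toNat : Int) - start + shift) 26
      result ++ [Char.ofNat (start + offset).toNat]
    else result ++ [char]) [])

def opplok_cipher (msg : String) (shift : Int) : String :=
  String.ofList (msg.toList.foldl (fun result char =>
    if PySem.Chars.isalpha char then
      result ++ (pvCaesarCipher (String.ofList [char]) ((char.toNat : Int) + shift)).toList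
    else result ++ [char]) [])

-- ===== PORT B =====
-- chr(base + (2 * o - base + shift) % 26), the replacement string stored at ordinal o
def pvVal (base shift o : Int) : String :=
  String.ofList [Char.ofNat (base + PySem.Int.mod (2 * o - base + shift) 26).toNat]

-- the translation table Source B builds: ord ↦ one-char replacement string
def pvTable (shift : Int) : PySem.Dict Int String :=
  ([65, 97] : List Int).foldl (fun t base =>
    (PySem.List.pyRange base (base + 26)).foldl (fun t o =>
      t.insert o (pvVal base shift o)) t)
    PySem.Dict.empty

-- msg.translate(table): each char is replaced by its table entry (keyed by its ordinal),
-- chars absent from the table are kept; ported by hand (exact for this str-valued table)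
def opplok_cipher_alt (msg : String) (shift : Int) : String :=
  String.ofList ((msg.toList.map (fun c =>
    ((pvTable shift).getD ((c.toNat : Int)) (String.ofList [c])).toList)).flatten)

-- ===== PRECONDITION & SPEC =====
def Spec_opplok_cipher (msg : String) (shift : Int) (out : String) : Prop := out = opplok_cipher_alt msg shift
instance (msg : String) (shift : Int) (out : String) : Decidable (Spec_opplok_cipher msg shift out) := by unfold Spec_opplok_cipher; infer_instance

-- ===== CLAIM (what is proved, stated in full; the proofs are below) =====
def Claim_equal_opplok_cipher : Prop := ∀ (msg : String) (shift : Int), Dom_opplok_cipher msg shift → Spec_opplok_cipher msg shift (opplok_cipher msg shift)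

-- ===== LEMMAS AND PROOFS =====

-- lookup in a dict whose items start with a contiguous keyed range
theorem pv_get?_mk_map_range (f : Int → String) (k : Int) :
    ∀ (n : Nat) (a : Int) (rest : List (Int × String)),
      (PySem.Dict.mk ((PySem.List.pyRange a (a + n)).map (fun o => (o, f o)) ++ rest)).get? k
        = if a ≤ k ∧ k < a + n then some (f k) else (PySem.Dict.mk rest).get? k := by
  intro n
  induction n with
  | zero =>
      intro a rest
      simp [PySem.List.pyRange]
  | succ n ih =>
      intro a rest
      rw [PySem.List.pyRange_one_cons (by omega : a < a + (n + 1 : Nat))]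
      simp only [List.map_cons, List.cons_append, PySem.Dict.get?_mk_cons]
      have h1 : a + 1 + (n : Int) = a + ((n + 1 : Nat) : Int) := by push_cast; ring
      have := ih (a + 1) rest
      rw [h1] at this
      rw [this]
      by_cases hk : a = k
      · subst hk; simp
      · have : (a == k) = false := by simpa using hk
        rw [this]
        simp only [Bool.false_eq_true, if_false]
        split_ifs with h2 h3 h4 <;> first | rfl | omega

theorem pv_table_get? (shift k : Int) :
    (pvTable shift).get? k =
      if 65 ≤ k ∧ k < 91 then some (pvVal 65 shift k)
      else if 97 ≤ k ∧ k < 123 then some (pvVal 97 shift k) else none := by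
  have hfresh : ∀ a ∈ PySem.List.pyRange 97 123,
      ((PySem.List.pyRange 65 91).foldl (fun t o => t.insert o (pvVal 65 shift o))
        PySem.Dict.empty).contains a = false := by
    intro a ha
    rw [PySem.Dict.contains_eq_decide_mem_keys]
    simp only [decide_eq_false_iff_not, PySem.Dict.keys]
    rw [PySem.Dict.items_foldl_insert_fresh (k := fun o => o) (v := fun o => pvVal 65 shift o) _ _
          (by intro _ _; exact PySem.Dict.contains_empty _)
          (by simpa using (by decide : (PySem.List.pyRange 65 91).Nodup))]
    simp only [PySem.Dict.empty, List.nil_append, List.map_map]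
    intro hmem
    simp only [List.mem_map, Function.comp] at hmem
    obtain ⟨o, ho, rfl⟩ := hmem
    rw [PySem.List.mem_pyRange_one] at ha ho
    omega
  have hitems : (pvTable shift).items =
      (PySem.List.pyRange 65 91).map (fun o => (o, pvVal 65 shift o)) ++
      (PySem.List.pyRange 97 123).map (fun o => (o, pvVal 97 shift o)) := by
    unfold pvTable
    simp only [List.foldl_cons, List.foldl_nil]
    norm_num
    rw [PySem.Dict.items_foldl_insert_fresh (k := fun o => o) (v := fun o => pvVal 97 shift o) _ _
          hfresh
          (by simpa using (by decide : (PySem.List.pyRange 97 123).Nodup))]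
    rw [PySem.Dict.items_foldl_insert_fresh (k := fun o => o) (v := fun o => pvVal 65 shift o) _ _
          (by intro _ _; exact PySem.Dict.contains_empty _)
          (by simpa using (by decide : (PySem.List.pyRange 65 91).Nodup))]
    simp [PySem.Dict.empty]
  have htab : pvTable shift = PySem.Dict.mk
      ((PySem.List.pyRange 65 91).map (fun o => (o, pvVal 65 shift o)) ++
       (PySem.List.pyRange 97 123).map (fun o => (o, pvVal 97 shift o))) := by
    apply PySem.Dict.ext; exact hitems
  have h1 := pv_get?_mk_map_range (pvVal 65 shift) k 26 65
      ((PySem.List.pyRange 97 123).map (fun o => (o, pvVal 97 shift o)))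
  have h2 := pv_get?_mk_map_range (pvVal 97 shift) k 26 97 []
  rw [show ((65 : Int) + (26 : Nat)) = 91 by norm_num] at h1
  rw [show ((97 : Int) + (26 : Nat)) = 123 by norm_num] at h2
  rw [List.append_nil] at h2
  rw [htab, h1, h2]
  simp [PySem.Dict.get?]

-- character-ordinal bridge
theorem pv_le_char (c : Char) (d : Char) : (d ≤ c) ↔ d.toNat ≤ c.toNat := by
  rw [Char.le_def, UInt32.le_iff_toNat_le]; rfl

-- per-character agreement of the two programs
theorem pv_step_eq (shift : Int) (c : Char) :
    (if PySem.Chars.isalpha c then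
        (pvCaesarCipher (String.ofList [c]) ((c.toNat : Int) + shift)).toList
      else [c])
    = ((pvTable shift).getD ((c.toNat : Int)) (String.ofList [c])).toList := by
  have eA : ('A' ≤ c) ↔ 65 ≤ c.toNat := pv_le_char c 'A'
  have eZ : (c ≤ 'Z') ↔ c.toNat ≤ 90 := pv_le_char 'Z' c
  have ea : ('a' ≤ c) ↔ 97 ≤ c.toNat := pv_le_char c 'a'
  have ez : (c ≤ 'z') ↔ c.toNat ≤ 122 := pv_le_char 'z' c
  have hup : PySem.Chars.isupper c = true ↔ (65 ≤ c.toNat ∧ c.toNat ≤ 90) := by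
    simp only [PySem.Chars.isupper, Bool.and_eq_true, decide_eq_true_eq]
    exact and_congr eA eZ
  have hlo : PySem.Chars.islower c = true ↔ (97 ≤ c.toNat ∧ c.toNat ≤ 122) := by
    simp only [PySem.Chars.islower, Bool.and_eq_true, decide_eq_true_eq]
    exact and_congr ea ez
  rw [PySem.Dict.getD_eq_get?_getD, pv_table_get?]
  by_cases hU : 65 ≤ c.toNat ∧ c.toNat ≤ 90
  · have hupb : PySem.Chars.isupper c = true := hup.mpr hU
    have halpha : PySem.Chars.isalpha c = true := by
      simp [PySem.Chars.isalpha, hupb]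
    rw [if_pos (by omega : (65:Int) ≤ c.toNat ∧ (c.toNat:Int) < 91)]
    have harg : (c.toNat : Int) - 65 + ((c.toNat : Int) + shift)
        = 2 * (c.toNat : Int) - 65 + shift := by ring
    simp [pvCaesarCipher, pvVal, halpha, hupb, harg]
  · by_cases hL : 97 ≤ c.toNat ∧ c.toNat ≤ 122
    · have hlob : PySem.Chars.islower c = true := hlo.mpr hL
      have hupf : PySem.Chars.isupper c = false :=
        Bool.eq_false_iff.mpr (fun h => hU (hup.mp h))
      have halpha : PySem.Chars.isalpha c = true := by
        simp [PySem.Chars.isalpha, hlob]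
      rw [if_neg (by omega : ¬ ((65:Int) ≤ c.toNat ∧ (c.toNat:Int) < 91)),
          if_pos (by omega : (97:Int) ≤ c.toNat ∧ (c.toNat:Int) < 123)]
      have harg : (c.toNat : Int) - 97 + ((c.toNat : Int) + shift)
          = 2 * (c.toNat : Int) - 97 + shift := by ring
      simp [pvCaesarCipher, pvVal, halpha, hupf, harg]
    · have halpha : PySem.Chars.isalpha c = false := by
        simp only [PySem.Chars.isalpha, Bool.or_eq_false_iff]
        exact ⟨Bool.eq_false_iff.mpr (fun h => hU (hup.mp h)),
               Bool.eq_false_iff.mpr (fun h => hL (hlo.mp h))⟩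
      rw [if_neg (by omega : ¬ ((65:Int) ≤ c.toNat ∧ (c.toNat:Int) < 91)),
          if_neg (by omega : ¬ ((97:Int) ≤ c.toNat ∧ (c.toNat:Int) < 123))]
      simp [halpha]

-- ===== VERDICT (by name: the statement is the Claim_ definition above) =====
set_option maxRecDepth 4096 in
theorem opplok_cipher_spec : Claim_equal_opplok_cipher := by
  intro msg shift _
  unfold Spec_opplok_cipher opplok_cipher opplok_cipher_alt
  have hshape : (fun (result : List Char) char =>
      if PySem.Chars.isalpha char then
        result ++ (pvCaesarCipher (String.ofList [char]) ((char.toNat : Int) + shift)).toList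
      else result ++ [char])
      = fun (result : List Char) char => result ++
          (if PySem.Chars.isalpha char then
              (pvCaesarCipher (String.ofList [char]) ((char.toNat : Int) + shift)).toList
            else [char]) := by
    funext r c; split <;> rfl
  rw [hshape, PySem.List.foldl_append_eq_flatMap, List.nil_append, List.flatMap_def]
  refine congrArg String.ofList (congrArg List.flatten (List.map_congr_left ?_))
  intro c _
  exact pv_step_eq shift c
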